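-- pv_equiv track=rewrite | github.com/LiLabTsinghua/Yeast-MetaTwin | Code/retrosynthesis/common.py | rank_ec_number_dict
-- ===== SOURCE A (Python) =====
-- def rank_ec_number_dict(ec_numbers):
--     ec1 = {}
--     ec2 = {}
--     ec3 = {}
--     ec4 = {}
--     ec5 = {}
--     ec6 = {}
--     ec7 = {}
--
--     # Assign values to different dictionaries based on the key prefix
--     for k, v in ec_numbers.items():
--         if k.startswith('1.'):
--             ec1[k] = v
--         elif k.startswith('2.'):
--             ec2[k] = v
--         elif k.startswith('3.'):
--             ec3[k] = v
--         elif k.startswith('4.'):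
--             ec4[k] = v
--         elif k.startswith('5.'):
--             ec5[k] = v
--         elif k.startswith('6.'):
--             ec6[k] = v
--         elif k.startswith('7.'):
--             ec7[k] = v
--
--     # Sort the dictionaries in descending order by value
--     ec1 = dict(sorted(ec1.items(), key=lambda x: x[1], reverse=True))
--     ec2 = dict(sorted(ec2.items(), key=lambda x: x[1], reverse=True))
--     ec3 = dict(sorted(ec3.items(), key=lambda x: x[1], reverse=True))
--     ec4 = dict(sorted(ec4.items(), key=lambda x: x[1], reverse=True))
--     ec5 = dict(sorted(ec5.items(), key=lambda x: x[1], reverse=True))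
--     ec6 = dict(sorted(ec6.items(), key=lambda x: x[1], reverse=True))
--     ec7 = dict(sorted(ec7.items(), key=lambda x: x[1], reverse=True))
--
--     # Merge the dictionaries
--     tmp_dict = {**ec1, **ec2, **ec3, **ec4, **ec5, **ec6, **ec7}
--     return tmp_dict
-- ===== SOURCE B (Python) =====
-- def rank_ec_number_dict(ec_numbers):
--     # Keep only EC classes 1-7, then layer two stable sorts:
--     # value descending first, then class digit ascending (stable keeps the
--     # value order inside each class).
--     pairs = [kv for kv in ec_numbers.items()
--              if kv[0].startswith(('1.', '2.', '3.', '4.', '5.', '6.', '7.'))]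
--     pairs.sort(key=lambda kv: kv[1], reverse=True)
--     pairs.sort(key=lambda kv: kv[0][0])
--     return dict(pairs)
-- ===== Notes on version B (the rewrite author's own statement) =====
-- stated objective: simpler
-- what changed: Replaces the seven explicit bucket dicts, seven separate sorts and the 7-way dict merge with one prefix filter followed by two layered stable sorts (value descending, then class digit ascending), returning dict(pairs).
import Mathlib
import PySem

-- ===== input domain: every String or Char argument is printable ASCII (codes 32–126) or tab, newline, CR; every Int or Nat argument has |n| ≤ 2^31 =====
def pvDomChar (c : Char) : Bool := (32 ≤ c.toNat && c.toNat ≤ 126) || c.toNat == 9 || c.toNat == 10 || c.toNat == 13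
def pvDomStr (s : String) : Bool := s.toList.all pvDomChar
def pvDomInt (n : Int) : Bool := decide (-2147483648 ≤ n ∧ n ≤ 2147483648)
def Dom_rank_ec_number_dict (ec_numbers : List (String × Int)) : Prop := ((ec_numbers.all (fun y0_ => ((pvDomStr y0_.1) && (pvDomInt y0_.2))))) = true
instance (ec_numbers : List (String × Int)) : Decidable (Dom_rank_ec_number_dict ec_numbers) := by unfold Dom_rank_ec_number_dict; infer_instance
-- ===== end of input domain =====

-- B replaces A's seven bucket dicts + seven sorts + 7-way merge by one prefix filter and two
-- layered stable sorts (value descending, then class digit ascending); objective: simpler.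


-- ===== PORT A =====
-- the seven bucket dicts ec1 … ec7 of A's loop, as one record
structure EC7 where
  e1 : PySem.Dict String Int
  e2 : PySem.Dict String Int
  e3 : PySem.Dict String Int
  e4 : PySem.Dict String Int
  e5 : PySem.Dict String Int
  e6 : PySem.Dict String Int
  e7 : PySem.Dict String Int

-- the body of A's `for k, v in ec_numbers.items()` loop
def ecBucketStep (s : EC7) (kv : String × Int) : EC7 :=
  if PySem.Str.startswith kv.1 "1." then { s with e1 := s.e1.insert kv.1 kv.2 }
  else if PySem.Str.startswith kv.1 "2." then { s with e2 := s.e2.insert kv.1 kv.2 }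
  else if PySem.Str.startswith kv.1 "3." then { s with e3 := s.e3.insert kv.1 kv.2 }
  else if PySem.Str.startswith kv.1 "4." then { s with e4 := s.e4.insert kv.1 kv.2 }
  else if PySem.Str.startswith kv.1 "5." then { s with e5 := s.e5.insert kv.1 kv.2 }
  else if PySem.Str.startswith kv.1 "6." then { s with e6 := s.e6.insert kv.1 kv.2 }
  else if PySem.Str.startswith kv.1 "7." then { s with e7 := s.e7.insert kv.1 kv.2 }
  else s

def rank_ec_number_dict (ec_numbers : List (String × Int)) : List (String × Int) :=
  -- the parameter is a Python dict: its items() carry distinct keys, modelled via Dict.ofList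
  let xs := (PySem.Dict.ofList ec_numbers).items
  let s := xs.foldl ecBucketStep ⟨.empty, .empty, .empty, .empty, .empty, .empty, .empty⟩
  let ec1 := PySem.Dict.ofList (PySem.List.sorted s.e1.items (fun kv => kv.2) true)
  let ec2 := PySem.Dict.ofList (PySem.List.sorted s.e2.items (fun kv => kv.2) true)
  let ec3 := PySem.Dict.ofList (PySem.List.sorted s.e3.items (fun kv => kv.2) true)
  let ec4 := PySem.Dict.ofList (PySem.List.sorted s.e4.items (fun kv => kv.2) true)
  let ec5 := PySem.Dict.ofList (PySem.List.sorted s.e5.items (fun kv => kv.2) true)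
  let ec6 := PySem.Dict.ofList (PySem.List.sorted s.e6.items (fun kv => kv.2) true)
  let ec7 := PySem.Dict.ofList (PySem.List.sorted s.e7.items (fun kv => kv.2) true)
  let tmp := ((((((PySem.Dict.empty.update ec1.items).update ec2.items).update ec3.items).update
      ec4.items).update ec5.items).update ec6.items).update ec7.items
  tmp.items

-- ===== PORT B =====
def rank_ec_number_dict_alt (ec_numbers : List (String × Int)) : List (String × Int) :=
  let pairs := (PySem.Dict.ofList ec_numbers).items.filter
    (fun kv => (["1.", "2.", "3.", "4.", "5.", "6.", "7."] : List String).any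
      (fun q => PySem.Str.startswith kv.1 q))
  let byVal := PySem.List.sorted pairs (fun kv => kv.2) true
  -- kv[0][0]: exact here — every kept key starts with a two-char prefix, so it is nonempty
  let byCls := PySem.List.sorted byVal (fun kv => kv.1.toList.headD ' ') false
  (PySem.Dict.ofList byCls).items

-- ===== PRECONDITION & SPEC =====
def Spec_rank_ec_number_dict (ec_numbers : List (String × Int)) (out : List (String × Int)) : Prop := out = rank_ec_number_dict_alt ec_numbers
instance (ec_numbers : List (String × Int)) (out : List (String × Int)) : Decidable (Spec_rank_ec_number_dict ec_numbers out) := by unfold Spec_rank_ec_number_dict; infer_instance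

-- ===== CLAIM (what is proved, stated in full; the proofs are below) =====
def Claim_equal_rank_ec_number_dict : Prop := ∀ (ec_numbers : List (String × Int)), Dom_rank_ec_number_dict ec_numbers → Spec_rank_ec_number_dict ec_numbers (rank_ec_number_dict ec_numbers)

-- ===== LEMMAS AND PROOFS =====

-- `s.startswith(c + '.')` over the character list
theorem sw2_iff (s : String) (c : Char) :
    PySem.Str.startswith s (String.ofList [c, '.']) = true ↔ ∃ t, s.toList = c :: '.' :: t := by
  rw [PySem.Str.startswith_eq, PySem.Chars.startswith_iff]
  constructor
  · rintro ⟨t, ht⟩; exact ⟨t, by simpa using ht.symm⟩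
  · rintro ⟨t, ht⟩; exact ⟨t, by simp [ht]⟩


theorem sw2_excl {s : String} {c c' : Char} (h : PySem.Str.startswith s (String.ofList [c, '.']) = true)
    (hne : c' ≠ c) : PySem.Str.startswith s (String.ofList [c', '.']) = false := by
  rw [sw2_iff] at h
  obtain ⟨t, ht⟩ := h
  by_contra hb
  rw [Bool.not_eq_false, sw2_iff] at hb
  obtain ⟨t', ht'⟩ := hb
  rw [ht] at ht'
  injection ht' with h1 h2
  exact hne h1.symm


-- a Dict built from pairs with distinct keys has exactly those pairs as items
theorem dict_ofList_items (l : List (String × Int)) (h : (l.map Prod.fst).Nodup) :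
    (PySem.Dict.ofList l).items = l := by
  have := PySem.Dict.items_foldl_insert_fresh l Prod.fst Prod.snd PySem.Dict.empty
    (fun a _ => PySem.Dict.contains_empty _) h
  simpa [PySem.Dict.ofList, PySem.Dict.update, PySem.Dict.empty] using this


-- insertBy skips a block it is not ordered before
theorem insertBy_append_left {α : Type} (before : α → α → Bool) (x : α) (as bs : List α)
    (h : ∀ a ∈ as, before x a = false) :
    PySem.List.insertBy before x (as ++ bs) = as ++ PySem.List.insertBy before x bs := by
  induction as with
  | nil => simp
  | cons a as ih =>
    have ha := h a (by simp)
    rw [List.cons_append]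
    simp only [PySem.List.insertBy, ha]
    simp [ih (fun a ha => h a (by simp [ha]))]


-- insertBy goes to the head when ordered before everything
theorem insertBy_all_before {α : Type} (before : α → α → Bool) (x : α) (zs : List α)
    (h : ∀ z ∈ zs, before x z = true) :
    PySem.List.insertBy before x zs = x :: zs := by
  cases zs with
  | nil => simp [PySem.List.insertBy]
  | cons z zs => simp [PySem.List.insertBy, h z (by simp)]


-- filtering commutes with one stable descending insertion
theorem filter_insertBy {α κ : Type} [LinearOrder κ] (key : α → κ) (pq : α → Bool) (x : α)
    (ys : List α) (hys : ys.Pairwise (fun a b => key b ≤ key a)) :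
    (PySem.List.insertBy (fun a b => decide (key b < key a)) x ys).filter pq =
      if pq x then PySem.List.insertBy (fun a b => decide (key b < key a)) x (ys.filter pq)
      else ys.filter pq := by
  induction ys with
  | nil => cases hpx : pq x <;> simp [PySem.List.insertBy, hpx]
  | cons y ys ih =>
    rw [List.pairwise_cons] at hys
    obtain ⟨hy, htl⟩ := hys
    by_cases hxy : key y < key x
    · -- x goes right before y
      simp only [PySem.List.insertBy, hxy, decide_true, if_true]
      cases hpx : pq x with
      | false => simp [hpx]
      | true =>
        cases hpy : pq y with
        | true => simp [hpx, hpy, PySem.List.insertBy, hxy]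
        | false =>
          simp only [List.filter_cons, hpx, hpy, if_true]
          rw [insertBy_all_before]
          intro z hz
          have hzy : key z ≤ key y := hy z (List.mem_of_mem_filter hz)
          simp [lt_of_le_of_lt hzy hxy]
    · have hxy' : decide (key y < key x) = false := by simp [hxy]
      simp only [PySem.List.insertBy, hxy', Bool.false_eq_true, if_false]
      cases hpy : pq y with
      | true =>
        simp only [List.filter_cons, hpy, ih htl]
        cases hpx : pq x with
        | false => simp
        | true => simp [PySem.List.insertBy, hxy']
      | false =>
        simp only [List.filter_cons, hpy, ih htl]
        simp


-- filtering commutes with the stable descending sort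
theorem filter_sorted_rev {α κ : Type} [LinearOrder κ] (l : List α) (key : α → κ) (pq : α → Bool) :
    (PySem.List.sorted l key true).filter pq = PySem.List.sorted (l.filter pq) key true := by
  induction l using List.reverseRecOn with
  | nil => rfl
  | append_singleton l x ih =>
    rw [PySem.List.sorted_rev_eq_foldl_insertBy, List.foldl_append,
      ← PySem.List.sorted_rev_eq_foldl_insertBy, List.foldl_cons, List.foldl_nil]
    rw [filter_insertBy key pq x _ (PySem.List.sorted_pairwise_rev l key), ih, List.filter_append]
    cases hpx : pq x with
    | false => simp [hpx]
    | true =>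
      simp only [hpx, List.filter_cons, List.filter_nil, if_true]
      conv_rhs => rw [PySem.List.sorted_rev_eq_foldl_insertBy, List.foldl_append,
        List.foldl_cons, List.foldl_nil]
      rw [← PySem.List.sorted_rev_eq_foldl_insertBy]


-- a stable ascending sort by a key ranging over c1 < c2 < … is the concatenation of the key-blocks
theorem sorted_blocks {α κ : Type} [LinearOrder κ] (l : List α) (key : α → κ) (cs : List κ)
    (hcs : cs.Pairwise (· < ·)) (hall : ∀ x ∈ l, key x ∈ cs) :
    PySem.List.sorted l key false =
      (cs.map (fun c => l.filter (fun x => decide (key x = c)))).flatten := by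
  induction l using List.reverseRecOn with
  | nil =>
    rw [show PySem.List.sorted ([] : List α) key false = [] from rfl]
    symm
    simp
  | append_singleton l x ih =>
    have ihl := ih (fun y hy => hall y (by simp [hy]))
    rw [PySem.List.sorted_eq_foldl_insertBy, List.foldl_append,
      ← PySem.List.sorted_eq_foldl_insertBy, List.foldl_cons, List.foldl_nil, ihl]
    obtain ⟨cs1, cs2, hsplit⟩ := List.append_of_mem (hall x (by simp))
    subst hsplit
    rw [List.pairwise_append] at hcs
    obtain ⟨h1, h2, h12⟩ := hcs
    rw [List.pairwise_cons] at h2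
    obtain ⟨h2x, _⟩ := h2
    have hlt1 : ∀ c ∈ cs1, c < key x := fun c hc => h12 c hc (key x) (by simp)
    -- blocks of l ++ [x]
    have hblock : ∀ c : κ, c ≠ key x →
        (l ++ [x]).filter (fun y => decide (key y = c)) = l.filter (fun y => decide (key y = c)) := by
      intro c hc
      rw [List.filter_append]
      simp [Ne.symm hc]
    have hblockx : (l ++ [x]).filter (fun y => decide (key y = key x)) =
        l.filter (fun y => decide (key y = key x)) ++ [x] := by
      rw [List.filter_append]; simp
    rw [List.map_append, List.map_cons, List.flatten_append, List.flatten_cons]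
    rw [insertBy_append_left]
    · rw [insertBy_append_left]
      · rw [insertBy_all_before]
        · rw [List.map_append, List.map_cons, List.flatten_append, List.flatten_cons, hblockx]
          rw [List.map_congr_left (fun c hc => hblock c (ne_of_lt (hlt1 c hc))),
            List.map_congr_left (fun c hc => hblock c (ne_of_gt (h2x c hc)))]
          simp
        · intro z hz
          simp only [List.mem_flatten, List.mem_map] at hz
          obtain ⟨b, ⟨c, hc, rfl⟩, hzb⟩ := hz
          have : key z = c := by simpa using (List.mem_filter.mp hzb).2
          simp [this, h2x c hc]
      · intro a ha
        have : key a = key x := by simpa using (List.mem_filter.mp ha).2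
        simp [this]
    · intro a ha
      simp only [List.mem_flatten, List.mem_map] at ha
      obtain ⟨b, ⟨c, hc, rfl⟩, hab⟩ := ha
      have : key a = c := by simpa using (List.mem_filter.mp hab).2
      simp [this, not_lt_of_gt (hlt1 c hc)]


-- a filtered bucket never already contains a key absent from the source list
theorem nocontains (l : List (String × Int)) (p : (String × Int) → Bool) (k : String)
    (hk : k ∉ l.map Prod.fst) :
    (PySem.Dict.mk (l.filter p) : PySem.Dict String Int).contains k = false := by
  simp only [PySem.Dict.contains, List.any_eq_false]
  intro q hq he
  have he' : q.1 = k := by simpa using he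
  exact hk (he' ▸ List.mem_map_of_mem (List.mem_of_mem_filter hq))

-- A's bucketing loop collects exactly the prefix-filtered items, in order
theorem bucketsA (xs : List (String × Int)) (h : (xs.map Prod.fst).Nodup) :
    xs.foldl ecBucketStep ⟨.empty, .empty, .empty, .empty, .empty, .empty, .empty⟩ =
      ⟨⟨xs.filter (fun kv => PySem.Str.startswith kv.1 "1.")⟩,
       ⟨xs.filter (fun kv => PySem.Str.startswith kv.1 "2.")⟩,
       ⟨xs.filter (fun kv => PySem.Str.startswith kv.1 "3.")⟩,
       ⟨xs.filter (fun kv => PySem.Str.startswith kv.1 "4.")⟩,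
       ⟨xs.filter (fun kv => PySem.Str.startswith kv.1 "5.")⟩,
       ⟨xs.filter (fun kv => PySem.Str.startswith kv.1 "6.")⟩,
       ⟨xs.filter (fun kv => PySem.Str.startswith kv.1 "7.")⟩⟩ := by
  induction xs using List.reverseRecOn with
  | nil => rfl
  | append_singleton l kv ih =>
    simp only [List.map_append, List.nodup_append, List.map_cons, List.map_nil] at h
    obtain ⟨hl, -, hdisj⟩ := h
    have hk : kv.1 ∉ l.map Prod.fst := by
      intro hmem
      have := hdisj kv.1 hmem
      simp at this
    rw [List.foldl_append, List.foldl_cons, List.foldl_nil, ih hl]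
    simp only [List.filter_append]
    unfold ecBucketStep
    by_cases h1 : PySem.Str.startswith kv.1 "1." = true
    · have f2 := sw2_excl (c := '1') (c' := '2') h1 (by decide)
      have f3 := sw2_excl (c := '1') (c' := '3') h1 (by decide)
      have f4 := sw2_excl (c := '1') (c' := '4') h1 (by decide)
      have f5 := sw2_excl (c := '1') (c' := '5') h1 (by decide)
      have f6 := sw2_excl (c := '1') (c' := '6') h1 (by decide)
      have f7 := sw2_excl (c := '1') (c' := '7') h1 (by decide)
      simp only [f2, f3, f4, f5, f6, f7, h1, if_true, Bool.false_eq_true, if_false, List.filter_cons,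
        List.filter_nil, List.append_nil, EC7.mk.injEq]
      refine ⟨?_, by simp, by simp, by simp, by simp, by simp, by simp⟩
      apply PySem.Dict.ext
      rw [PySem.Dict.items_insert_of_not_contains _ _ (nocontains l _ kv.1 hk)]
    · by_cases h2 : PySem.Str.startswith kv.1 "2." = true
      · have f1 : PySem.Str.startswith kv.1 "1." = false := by simpa using h1
        have f3 := sw2_excl (c := '2') (c' := '3') h2 (by decide)
        have f4 := sw2_excl (c := '2') (c' := '4') h2 (by decide)
        have f5 := sw2_excl (c := '2') (c' := '5') h2 (by decide)
        have f6 := sw2_excl (c := '2') (c' := '6') h2 (by decide)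
        have f7 := sw2_excl (c := '2') (c' := '7') h2 (by decide)
        simp only [f1, f3, f4, f5, f6, f7, h2, if_true, Bool.false_eq_true, if_false, List.filter_cons,
          List.filter_nil, List.append_nil, EC7.mk.injEq]
        refine ⟨by simp, ?_, by simp, by simp, by simp, by simp, by simp⟩
        apply PySem.Dict.ext
        rw [PySem.Dict.items_insert_of_not_contains _ _ (nocontains l _ kv.1 hk)]
      · by_cases h3 : PySem.Str.startswith kv.1 "3." = true
        · have f1 : PySem.Str.startswith kv.1 "1." = false := by simpa using h1
          have f2 : PySem.Str.startswith kv.1 "2." = false := by simpa using h2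
          have f4 := sw2_excl (c := '3') (c' := '4') h3 (by decide)
          have f5 := sw2_excl (c := '3') (c' := '5') h3 (by decide)
          have f6 := sw2_excl (c := '3') (c' := '6') h3 (by decide)
          have f7 := sw2_excl (c := '3') (c' := '7') h3 (by decide)
          simp only [f1, f2, f4, f5, f6, f7, h3, if_true, Bool.false_eq_true, if_false, List.filter_cons,
            List.filter_nil, List.append_nil, EC7.mk.injEq]
          refine ⟨by simp, by simp, ?_, by simp, by simp, by simp, by simp⟩
          apply PySem.Dict.ext
          rw [PySem.Dict.items_insert_of_not_contains _ _ (nocontains l _ kv.1 hk)]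
        · by_cases h4 : PySem.Str.startswith kv.1 "4." = true
          · have f1 : PySem.Str.startswith kv.1 "1." = false := by simpa using h1
            have f2 : PySem.Str.startswith kv.1 "2." = false := by simpa using h2
            have f3 : PySem.Str.startswith kv.1 "3." = false := by simpa using h3
            have f5 := sw2_excl (c := '4') (c' := '5') h4 (by decide)
            have f6 := sw2_excl (c := '4') (c' := '6') h4 (by decide)
            have f7 := sw2_excl (c := '4') (c' := '7') h4 (by decide)
            simp only [f1, f2, f3, f5, f6, f7, h4, if_true, Bool.false_eq_true, if_false, List.filter_cons,
              List.filter_nil, List.append_nil, EC7.mk.injEq]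
            refine ⟨by simp, by simp, by simp, ?_, by simp, by simp, by simp⟩
            apply PySem.Dict.ext
            rw [PySem.Dict.items_insert_of_not_contains _ _ (nocontains l _ kv.1 hk)]
          · by_cases h5 : PySem.Str.startswith kv.1 "5." = true
            · have f1 : PySem.Str.startswith kv.1 "1." = false := by simpa using h1
              have f2 : PySem.Str.startswith kv.1 "2." = false := by simpa using h2
              have f3 : PySem.Str.startswith kv.1 "3." = false := by simpa using h3
              have f4 : PySem.Str.startswith kv.1 "4." = false := by simpa using h4
              have f6 := sw2_excl (c := '5') (c' := '6') h5 (by decide)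
              have f7 := sw2_excl (c := '5') (c' := '7') h5 (by decide)
              simp only [f1, f2, f3, f4, f6, f7, h5, if_true, Bool.false_eq_true, if_false, List.filter_cons,
                List.filter_nil, List.append_nil, EC7.mk.injEq]
              refine ⟨by simp, by simp, by simp, by simp, ?_, by simp, by simp⟩
              apply PySem.Dict.ext
              rw [PySem.Dict.items_insert_of_not_contains _ _ (nocontains l _ kv.1 hk)]
            · by_cases h6 : PySem.Str.startswith kv.1 "6." = true
              · have f1 : PySem.Str.startswith kv.1 "1." = false := by simpa using h1
                have f2 : PySem.Str.startswith kv.1 "2." = false := by simpa using h2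
                have f3 : PySem.Str.startswith kv.1 "3." = false := by simpa using h3
                have f4 : PySem.Str.startswith kv.1 "4." = false := by simpa using h4
                have f5 : PySem.Str.startswith kv.1 "5." = false := by simpa using h5
                have f7 := sw2_excl (c := '6') (c' := '7') h6 (by decide)
                simp only [f1, f2, f3, f4, f5, f7, h6, if_true, Bool.false_eq_true, if_false, List.filter_cons,
                  List.filter_nil, List.append_nil, EC7.mk.injEq]
                refine ⟨by simp, by simp, by simp, by simp, by simp, ?_, by simp⟩
                apply PySem.Dict.ext
                rw [PySem.Dict.items_insert_of_not_contains _ _ (nocontains l _ kv.1 hk)]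
              · by_cases h7 : PySem.Str.startswith kv.1 "7." = true
                · have f1 : PySem.Str.startswith kv.1 "1." = false := by simpa using h1
                  have f2 : PySem.Str.startswith kv.1 "2." = false := by simpa using h2
                  have f3 : PySem.Str.startswith kv.1 "3." = false := by simpa using h3
                  have f4 : PySem.Str.startswith kv.1 "4." = false := by simpa using h4
                  have f5 : PySem.Str.startswith kv.1 "5." = false := by simpa using h5
                  have f6 : PySem.Str.startswith kv.1 "6." = false := by simpa using h6
                  simp only [f1, f2, f3, f4, f5, f6, h7, if_true, Bool.false_eq_true, if_false, List.filter_cons,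
                    List.filter_nil, List.append_nil, EC7.mk.injEq]
                  refine ⟨by simp, by simp, by simp, by simp, by simp, by simp, ?_⟩
                  apply PySem.Dict.ext
                  rw [PySem.Dict.items_insert_of_not_contains _ _ (nocontains l _ kv.1 hk)]
                · have f1 : PySem.Str.startswith kv.1 "1." = false := by simpa using h1
                  have f2 : PySem.Str.startswith kv.1 "2." = false := by simpa using h2
                  have f3 : PySem.Str.startswith kv.1 "3." = false := by simpa using h3
                  have f4 : PySem.Str.startswith kv.1 "4." = false := by simpa using h4
                  have f5 : PySem.Str.startswith kv.1 "5." = false := by simpa using h5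
                  have f6 : PySem.Str.startswith kv.1 "6." = false := by simpa using h6
                  have f7 : PySem.Str.startswith kv.1 "7." = false := by simpa using h7
                  simp only [f1, f2, f3, f4, f5, f6, f7, Bool.false_eq_true, if_false, List.filter_cons,
                    List.filter_nil, List.append_nil]


-- the heart: both tails agree on any item list with distinct keys
theorem core_eq (xs : List (String × Int)) (hnd : (xs.map Prod.fst).Nodup) :
    (let s := xs.foldl ecBucketStep ⟨.empty, .empty, .empty, .empty, .empty, .empty, .empty⟩
     let ec1 := PySem.Dict.ofList (PySem.List.sorted s.e1.items (fun kv => kv.2) true)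
     let ec2 := PySem.Dict.ofList (PySem.List.sorted s.e2.items (fun kv => kv.2) true)
     let ec3 := PySem.Dict.ofList (PySem.List.sorted s.e3.items (fun kv => kv.2) true)
     let ec4 := PySem.Dict.ofList (PySem.List.sorted s.e4.items (fun kv => kv.2) true)
     let ec5 := PySem.Dict.ofList (PySem.List.sorted s.e5.items (fun kv => kv.2) true)
     let ec6 := PySem.Dict.ofList (PySem.List.sorted s.e6.items (fun kv => kv.2) true)
     let ec7 := PySem.Dict.ofList (PySem.List.sorted s.e7.items (fun kv => kv.2) true)
     let tmp := ((((((PySem.Dict.empty.update ec1.items).update ec2.items).update ec3.items).update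
         ec4.items).update ec5.items).update ec6.items).update ec7.items
     tmp.items) =
    (let pairs := xs.filter
       (fun kv => (["1.", "2.", "3.", "4.", "5.", "6.", "7."] : List String).any
         (fun q => PySem.Str.startswith kv.1 q))
     let byVal := PySem.List.sorted pairs (fun kv => kv.2) true
     let byCls := PySem.List.sorted byVal (fun kv => kv.1.toList.headD ' ') false
     (PySem.Dict.ofList byCls).items) := by
  dsimp only
  have hsub : ∀ p : (String × Int) → Bool, ((xs.filter p).map Prod.fst).Nodup :=
    fun p => hnd.sublist (List.Sublist.map Prod.fst List.filter_sublist)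
  have hsortnd : ∀ p : (String × Int) → Bool,
      ((PySem.List.sorted (xs.filter p) (fun kv => kv.2) true).map Prod.fst).Nodup := by
    intro p
    exact (((PySem.List.sorted_perm (xs.filter p) (fun kv : String × Int => kv.2) true).map
      Prod.fst).nodup_iff).mpr (hsub p)
  have hPmem : ∀ x : String × Int,
      (["1.", "2.", "3.", "4.", "5.", "6.", "7."] : List String).any
        (fun q => PySem.Str.startswith x.1 q) = true →
      ∃ c t, c ∈ (['1', '2', '3', '4', '5', '6', '7'] : List Char) ∧
        x.1.toList = c :: '.' :: t := by
    intro x hx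
    simp only [List.any_cons, List.any_nil, Bool.or_eq_true, Bool.or_false] at hx
    rcases hx with h | h | h | h | h | h | h
    · obtain ⟨t, ht⟩ := (sw2_iff x.1 '1').mp h; exact ⟨'1', t, by decide, ht⟩
    · obtain ⟨t, ht⟩ := (sw2_iff x.1 '2').mp h; exact ⟨'2', t, by decide, ht⟩
    · obtain ⟨t, ht⟩ := (sw2_iff x.1 '3').mp h; exact ⟨'3', t, by decide, ht⟩
    · obtain ⟨t, ht⟩ := (sw2_iff x.1 '4').mp h; exact ⟨'4', t, by decide, ht⟩
    · obtain ⟨t, ht⟩ := (sw2_iff x.1 '5').mp h; exact ⟨'5', t, by decide, ht⟩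
    · obtain ⟨t, ht⟩ := (sw2_iff x.1 '6').mp h; exact ⟨'6', t, by decide, ht⟩
    · obtain ⟨t, ht⟩ := (sw2_iff x.1 '7').mp h; exact ⟨'7', t, by decide, ht⟩
  have hM : ∀ x ∈ PySem.List.sorted
      (xs.filter (fun kv => (["1.", "2.", "3.", "4.", "5.", "6.", "7."] : List String).any
        (fun q => PySem.Str.startswith kv.1 q))) (fun kv => kv.2) true,
      (["1.", "2.", "3.", "4.", "5.", "6.", "7."] : List String).any
        (fun q => PySem.Str.startswith x.1 q) = true := by
    intro x hx
    rw [PySem.List.mem_sorted] at hx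
    exact (List.mem_filter.mp hx).2
  have hall : ∀ x ∈ PySem.List.sorted
      (xs.filter (fun kv => (["1.", "2.", "3.", "4.", "5.", "6.", "7."] : List String).any
        (fun q => PySem.Str.startswith kv.1 q))) (fun kv => kv.2) true,
      x.1.toList.headD ' ' ∈ (['1', '2', '3', '4', '5', '6', '7'] : List Char) := by
    intro x hx
    obtain ⟨c, t, hc, ht⟩ := hPmem x (hM x hx)
    simpa [ht] using hc
  have hblock : ∀ c ∈ (['1', '2', '3', '4', '5', '6', '7'] : List Char),
      ∀ q : String, q = String.ofList [c, '.'] →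
      (PySem.List.sorted
        (xs.filter (fun kv => (["1.", "2.", "3.", "4.", "5.", "6.", "7."] : List String).any
          (fun q => PySem.Str.startswith kv.1 q))) (fun kv => kv.2) true).filter
        (fun x => decide (x.1.toList.headD ' ' = c)) =
      PySem.List.sorted
        (xs.filter (fun kv => PySem.Str.startswith kv.1 q))
        (fun kv => kv.2) true := by
    intro c hc q hq
    subst hq
    rw [List.filter_congr (q := fun x => PySem.Str.startswith x.1 (String.ofList [c, '.']))
      (fun x hx => ?_), filter_sorted_rev, List.filter_filter,
      List.filter_congr (q := fun kv => PySem.Str.startswith kv.1 (String.ofList [c, '.']))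
      (fun a _ => ?_)]
    · -- the combined predicate collapses: the prefix test implies membership in the 7-way any
      cases hpa : PySem.Str.startswith a.1 (String.ofList [c, '.']) with
      | false => simp only [hpa, Bool.false_and]
      | true =>
        simp only [hpa, Bool.true_and]
        refine List.any_eq_true.mpr ⟨String.ofList [c, '.'], ?_, hpa⟩
        fin_cases hc <;> decide
    · -- on members of the sorted filtered list the head test IS the prefix test
      dsimp only
      obtain ⟨c', t, _, ht⟩ := hPmem x (hM x hx)
      by_cases hcc : c' = c
      · subst hcc
        rw [(sw2_iff x.1 c').mpr ⟨t, ht⟩]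
        simp [ht]
      · have hsw : PySem.Str.startswith x.1 (String.ofList [c, '.']) = false := by
          by_contra hb
          rw [Bool.not_eq_false, sw2_iff] at hb
          obtain ⟨u, hu⟩ := hb
          rw [ht] at hu
          injection hu with h1 _
          exact hcc h1
        rw [hsw]
        simp [ht, hcc]
  rw [bucketsA xs hnd]
  dsimp only
  rw [dict_ofList_items _ (hsortnd _), dict_ofList_items _ (hsortnd _),
    dict_ofList_items _ (hsortnd _), dict_ofList_items _ (hsortnd _),
    dict_ofList_items _ (hsortnd _), dict_ofList_items _ (hsortnd _),
    dict_ofList_items _ (hsortnd _)]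
  rw [sorted_blocks _ _ (['1', '2', '3', '4', '5', '6', '7'] : List Char) (by decide) hall]
  simp only [List.map_cons, List.map_nil, List.flatten_cons, List.flatten_nil, List.append_nil]
  rw [hblock '1' (by decide) "1." rfl, hblock '2' (by decide) "2." rfl, hblock '3' (by decide) "3." rfl,
    hblock '4' (by decide) "4." rfl, hblock '5' (by decide) "5." rfl, hblock '6' (by decide) "6." rfl,
    hblock '7' (by decide) "7." rfl]
  -- the two stable sorts, re-grouped: name both sides' pieces
  have hndBC : ((PySem.List.sorted
      (PySem.List.sorted
        (xs.filter (fun kv => (["1.", "2.", "3.", "4.", "5.", "6.", "7."] : List String).any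
          (fun q => PySem.Str.startswith kv.1 q))) (fun kv => kv.2) true)
      (fun kv => kv.1.toList.headD ' ') false).map Prod.fst).Nodup := by
    exact (((PySem.List.sorted_perm _ (fun kv : String × Int => kv.1.toList.headD ' ')
      false).map Prod.fst).nodup_iff).mpr (hsortnd _)
  rw [sorted_blocks _ _ (['1', '2', '3', '4', '5', '6', '7'] : List Char) (by decide) hall] at hndBC
  simp only [List.map_cons, List.map_nil, List.flatten_cons, List.flatten_nil,
    List.append_nil] at hndBC
  rw [hblock '1' (by decide) "1." rfl, hblock '2' (by decide) "2." rfl, hblock '3' (by decide) "3." rfl,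
    hblock '4' (by decide) "4." rfl, hblock '5' (by decide) "5." rfl, hblock '6' (by decide) "6." rfl,
    hblock '7' (by decide) "7." rfl] at hndBC
  simp only [PySem.Dict.update]
  simp only [← List.foldl_append]
  simp only [List.append_assoc]
  rw [PySem.Dict.items_foldl_insert_fresh _ Prod.fst Prod.snd PySem.Dict.empty
    (fun a _ => PySem.Dict.contains_empty _) hndBC, dict_ofList_items _ hndBC]
  simp [PySem.Dict.empty]

-- ===== VERDICT (by name: the statement is the Claim_ definition above) =====
theorem rank_ec_number_dict_spec : Claim_equal_rank_ec_number_dict := by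
  intro ps _
  unfold Spec_rank_ec_number_dict rank_ec_number_dict rank_ec_number_dict_alt
  have hnd : (((PySem.Dict.ofList ps).items).map Prod.fst).Nodup := by
    have := PySem.Dict.nodup_keys_ofList ps
    simpa [PySem.Dict.keys] using this
  exact core_eq _ hnd
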